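-- pv_equiv track=rewrite | github.com/Tmh3101/Xpervia | backend/api/services/reco_service/text/tokenizer.py | _apply_phrase_map
-- ===== SOURCE A (Python) =====
-- from typing import List
--
-- def _apply_phrase_map(tokens: List[str], phrase_map: dict) -> List[str]:
--     if not phrase_map:
--         return tokens
--
--     out: List[str] = []
--     i, n = 0, len(tokens)
--     max_len = max((len(k) for k in phrase_map.keys()), default=1)
--     while i < n:
--         matched = False
--         for L in range(min(max_len, n - i), 1, -1):
--             tup = tuple(tokens[i:i+L])
--             if tup in phrase_map:
--                 out.append(phrase_map[tup])
--                 i += L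
--                 matched = True
--                 break
--         if not matched:
--             out.append(tokens[i])
--             i += 1
--     return out
-- ===== SOURCE B (Python) =====
-- from typing import List
--
-- def _apply_phrase_map(tokens: List[str], phrase_map: dict) -> List[str]:
--     if not phrase_map:
--         return tokens
--     index = {}
--     for k, v in phrase_map.items():
--         if len(k) >= 2:
--             index.setdefault((k[0], k[1]), []).append((k, v))
--     out: List[str] = []
--     i, n = 0, len(tokens)
--     while i < n:
--         best_len = 0
--         best_rep = None
--         if i + 1 < n:
--             for k, v in index.get((tokens[i], tokens[i + 1]), ()):
--                 L = len(k)
--                 if L > best_len and i + L <= n and list(k) == tokens[i:i + L]: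
--                     best_len, best_rep = L, v
--         if best_len:
--             out.append(best_rep)
--             i += best_len
--         else:
--             out.append(tokens[i])
--             i += 1
--     return out
-- ===== Notes on version B (the rewrite author's own statement) =====
-- stated objective: alternative
-- what changed: B builds a hash index of the length>=2 phrases keyed by their first two tokens once, then at each position scans only the bucket for the two upcoming tokens for the longest matching phrase, instead of A's per-position descending-length loop that slices and hashes a fresh tuple for every candidate length; with many phrases sharing their first two tokens the buckets grow, so B is not uniformly faster.
import Mathlib
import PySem

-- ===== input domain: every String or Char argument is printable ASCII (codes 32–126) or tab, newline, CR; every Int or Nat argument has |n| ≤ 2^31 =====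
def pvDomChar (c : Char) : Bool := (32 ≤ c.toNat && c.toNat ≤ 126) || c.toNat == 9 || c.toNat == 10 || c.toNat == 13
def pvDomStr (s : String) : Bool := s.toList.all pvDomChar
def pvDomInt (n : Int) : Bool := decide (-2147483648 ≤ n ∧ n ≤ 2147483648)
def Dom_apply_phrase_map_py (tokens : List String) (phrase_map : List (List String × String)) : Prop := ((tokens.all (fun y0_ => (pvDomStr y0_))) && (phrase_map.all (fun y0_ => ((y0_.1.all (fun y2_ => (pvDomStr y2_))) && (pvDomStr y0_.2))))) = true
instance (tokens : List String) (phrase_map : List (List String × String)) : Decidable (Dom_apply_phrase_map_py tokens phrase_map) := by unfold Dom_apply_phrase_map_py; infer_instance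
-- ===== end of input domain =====

-- B indexes the length>=2 phrases by their first two tokens once and, at each position, scans
-- only the bucket for the two upcoming tokens for the longest match; same return value, no speed claim.

-- ===== PORT A =====
-- tokens[i:i+L] for natural i, L
def pvSlice (tokens : List String) (i L : Nat) : List String := (tokens.drop i).take L

-- 'tup in phrase_map' + 'phrase_map[tup]' in one step: first entry whose key equals key
def pvLookup (pm : List (List String × String)) (key : List String) : Option String :=
  match pm with
  | [] => none
  | (k, v) :: rest => if k = key then some v else pvLookup rest key

-- max((len(k) for k in phrase_map.keys()), default=1); init 0 is exact for nonempty pm (lengths ≥ 0)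
def pvMaxLen (pm : List (List String × String)) : Nat :=
  pm.foldl (fun m kv => Nat.max m kv.1.length) 0

-- 'for L in range(L0, 1, -1): if tup in phrase_map: …': first (longest) L ≥ 2 whose slice is a key
def pvInnerA (tokens : List String) (pm : List (List String × String)) (i : Nat) : Nat → Option (String × Nat)
  | 0 => none
  | 1 => none
  | (L + 2) =>
    match pvLookup pm (pvSlice tokens i (L + 2)) with
    | some v => some (v, L + 2)
    | none => pvInnerA tokens pm i (L + 1)

-- the while-loop; fuel = n suffices since i grows by ≥ 1 each iteration
def pvLoopA (tokens : List String) (pm : List (List String × String)) (maxLen n : Nat) : Nat → Nat → List String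
  | 0, _ => []
  | fuel + 1, i =>
    if i < n then
      match pvInnerA tokens pm i (Nat.min maxLen (n - i)) with
      | some (v, L) => v :: pvLoopA tokens pm maxLen n fuel (i + L)
      | none => tokens.getD i "" :: pvLoopA tokens pm maxLen n fuel (i + 1)
    else []

def apply_phrase_map_py (tokens : List String) (phrase_map : List (List String × String)) : List String :=
  if phrase_map.isEmpty then tokens
  else pvLoopA tokens phrase_map (pvMaxLen phrase_map) tokens.length tokens.length 0

-- ===== PORT B =====
def pvAccLen : Option (String × Nat) → Nat
  | none => 0
  | some (_, L) => L

-- (k[0], k[1]); only used on keys with length ≥ 2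
def pvPairKey (k : List String) : String × String := (k.getD 0 "", k.getD 1 "")

-- index.setdefault(p, []).append(e)
def pvIdxAdd (d : List ((String × String) × List (List String × String)))
    (p : String × String) (e : List String × String) :
    List ((String × String) × List (List String × String)) :=
  match d with
  | [] => [(p, [e])]
  | (q, l) :: rest => if q = p then (q, l ++ [e]) :: rest else (q, l) :: pvIdxAdd rest p e

-- the "for k, v in phrase_map.items(): if len(k) >= 2: ..." build loop
def pvBuild (d : List ((String × String) × List (List String × String))) :
    List (List String × String) → List ((String × String) × List (List String × String))
  | [] => d
  | (k, v) :: rest =>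
    if 2 ≤ k.length then pvBuild (pvIdxAdd d (pvPairKey k) (k, v)) rest
    else pvBuild d rest

-- index.get(p, ())
def pvIdxGet (d : List ((String × String) × List (List String × String)))
    (p : String × String) : List (List String × String) :=
  match d with
  | [] => []
  | (q, l) :: rest => if q = p then l else pvIdxGet rest p

-- B's inner "for k, v in index.get(...)" pass keeping the longest matching candidate
def pvBestC (tokens : List String) (i n : Nat) :
    List (List String × String) → Option (String × Nat) → Option (String × Nat)
  | [], acc => acc
  | (k, v) :: rest, acc =>
    if pvAccLen acc < k.length ∧ i + k.length ≤ n ∧ k = pvSlice tokens i k.length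
    then pvBestC tokens i n rest (some (v, k.length))
    else pvBestC tokens i n rest acc

def pvLoopB (tokens : List String)
    (idx : List ((String × String) × List (List String × String))) (n : Nat) :
    Nat → Nat → List String
  | 0, _ => []
  | fuel + 1, i =>
    if i < n then
      match (if i + 1 < n
             then pvBestC tokens i n (pvIdxGet idx (tokens.getD i "", tokens.getD (i + 1) "")) none
             else none) with
      | some (v, L) => v :: pvLoopB tokens idx n fuel (i + L)
      | none => tokens.getD i "" :: pvLoopB tokens idx n fuel (i + 1)
    else []

def apply_phrase_map_py_alt (tokens : List String) (phrase_map : List (List String × String)) : List String :=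
  if phrase_map.isEmpty then tokens
  else pvLoopB tokens (pvBuild [] phrase_map) tokens.length tokens.length 0

-- ===== PRECONDITION & SPEC =====
def Spec_apply_phrase_map_py (tokens : List String) (phrase_map : List (List String × String)) (out : List String) : Prop := out = apply_phrase_map_py_alt tokens phrase_map
instance (tokens : List String) (phrase_map : List (List String × String)) (out : List String) : Decidable (Spec_apply_phrase_map_py tokens phrase_map out) := by unfold Spec_apply_phrase_map_py; infer_instance

-- ===== CLAIM (what is proved, stated in full; the proofs are below) =====
def Claim_equal_apply_phrase_map_py : Prop := ∀ (tokens : List String) (phrase_map : List (List String × String)), Dom_apply_phrase_map_py tokens phrase_map → Spec_apply_phrase_map_py tokens phrase_map (apply_phrase_map_py tokens phrase_map)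

-- ===== LEMMAS AND PROOFS =====

-- proof-side reference: the longest matching entry of a full entry list (B without the index)
def pvBestB (tokens : List String) (i n : Nat) :
    List (List String × String) → Option (String × Nat) → Option (String × Nat)
  | [], acc => acc
  | (k, v) :: rest, acc =>
    if 2 ≤ k.length ∧ pvAccLen acc < k.length ∧ i + k.length ≤ n ∧ k = pvSlice tokens i k.length
    then pvBestB tokens i n rest (some (v, k.length))
    else pvBestB tokens i n rest acc

-- a key matches position i: length ≥ 2, fits before n, and equals the upcoming tokens
def pvMatch (tokens : List String) (n i : Nat) (k : List String) : Prop :=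
  2 ≤ k.length ∧ i + k.length ≤ n ∧ k = pvSlice tokens i k.length

def pvMerge (a b : Option (String × Nat)) : Option (String × Nat) :=
  if pvAccLen a < pvAccLen b then b else a

-- result characterization shared by both searches
def pvChar (tokens : List String) (pm : List (List String × String)) (i L₀ : Nat) : Option (String × Nat) → Prop
  | none => ∀ L, 2 ≤ L → L ≤ L₀ → pvLookup pm (pvSlice tokens i L) = none
  | some (v, L) => 2 ≤ L ∧ L ≤ L₀ ∧ pvLookup pm (pvSlice tokens i L) = some v ∧
      ∀ L', L < L' → L' ≤ L₀ → pvLookup pm (pvSlice tokens i L') = none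

def pvGood (tokens : List String) (i n : Nat) (q : List (List String × String)) : Option (String × Nat) → Prop
  | none => ∀ kv ∈ q, ¬ pvMatch tokens n i kv.1
  | some (v, L) => 2 ≤ L ∧ i + L ≤ n ∧ pvLookup q (pvSlice tokens i L) = some v ∧
      ∀ kv ∈ q, pvMatch tokens n i kv.1 → kv.1.length ≤ L

theorem pvSlice_len (tokens : List String) (i L : Nat) (h : i + L ≤ tokens.length) :
    (pvSlice tokens i L).length = L := by
  simp [pvSlice]; omega

theorem pvLookup_none (pm : List (List String × String)) (key : List String)
    (h : ∀ kv ∈ pm, kv.1 ≠ key) : pvLookup pm key = none := by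
  induction pm with
  | nil => rfl
  | cons kv rest ih =>
    obtain ⟨k, v⟩ := kv
    simp only [pvLookup]
    rw [if_neg (h (k, v) (List.mem_cons_self ..))]
    exact ih (fun kv hm => h kv (List.mem_cons_of_mem _ hm))

theorem pvLookup_some_mem (pm : List (List String × String)) (key : List String) (v : String)
    (h : pvLookup pm key = some v) : ∃ kv ∈ pm, kv.1 = key := by
  induction pm with
  | nil => simp [pvLookup] at h
  | cons kv rest ih =>
    obtain ⟨k, w⟩ := kv
    simp only [pvLookup] at h
    by_cases hk : k = key
    · exact ⟨(k, w), List.mem_cons_self .., hk⟩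
    · rw [if_neg hk] at h
      obtain ⟨kv, hm, he⟩ := ih h
      exact ⟨kv, List.mem_cons_of_mem _ hm, he⟩

theorem pvMaxLen_ge (pm : List (List String × String)) (kv : List String × String)
    (h : kv ∈ pm) : kv.1.length ≤ pvMaxLen pm := by
  have aux : ∀ (l : List (List String × String)) (a : Nat), kv ∈ l ∨ kv.1.length ≤ a →
      kv.1.length ≤ l.foldl (fun m kv => Nat.max m kv.1.length) a := by
    intro l
    induction l with
    | nil => intro a h; simp at h; simpa using h
    | cons e rest ih =>
      intro a h
      simp only [List.foldl]
      apply ih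
      rcases h with h | h
      · rcases List.mem_cons.mp h with h | h
        · right; subst h; exact Nat.le_max_right _ _
        · left; exact h
      · right; exact le_trans h (Nat.le_max_left _ _)
  exact aux pm 0 (Or.inl h)

theorem pvAccLen_merge (a b : Option (String × Nat)) :
    pvAccLen (pvMerge a b) = Nat.max (pvAccLen a) (pvAccLen b) := by
  simp only [pvMerge]
  split_ifs with h
  · exact (Nat.max_eq_right (le_of_lt h)).symm
  · exact (Nat.max_eq_left (Nat.le_of_not_lt h)).symm

theorem pvMerge_right (a b : Option (String × Nat)) (h : pvAccLen a < pvAccLen b) :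
    pvMerge a b = b := by
  simp [pvMerge, h]

theorem pvMerge_left (a b : Option (String × Nat)) (h : pvAccLen b ≤ pvAccLen a) :
    pvMerge a b = a := by
  simp only [pvMerge]
  rw [if_neg (by omega)]

theorem pvMerge_none (a : Option (String × Nat)) : pvMerge a none = a :=
  pvMerge_left a none (by simp [pvAccLen])

theorem pvMerge_step (acc : Option (String × Nat)) (v : String) (kl : Nat)
    (R : Option (String × Nat)) :
    pvMerge acc (pvMerge (some (v, kl)) R)
      = if pvAccLen acc < kl then pvMerge (some (v, kl)) R else pvMerge acc R := by
  split_ifs with h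
  · apply pvMerge_right
    rw [pvAccLen_merge]
    simp only [pvAccLen]
    exact lt_of_lt_of_le h (Nat.le_max_left _ _)
  · rcases Nat.lt_or_ge kl (pvAccLen R) with hR | hR
    · rw [pvMerge_right (some (v, kl)) R (by simpa [pvAccLen] using hR)]
    · rw [pvMerge_left (some (v, kl)) R (by simpa [pvAccLen] using hR)]
      rw [pvMerge_left acc (some (v, kl)) (by simpa [pvAccLen] using Nat.le_of_not_lt h)]
      rw [pvMerge_left acc R (by omega)]

theorem pvBestB_merge (tokens : List String) (i n : Nat)
    (q : List (List String × String)) : ∀ acc,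
    pvBestB tokens i n q acc = pvMerge acc (pvBestB tokens i n q none) := by
  induction q with
  | nil => intro acc; simp only [pvBestB, pvMerge_none]
  | cons kv rest ih =>
    obtain ⟨k, v⟩ := kv
    intro acc
    by_cases hM : 2 ≤ k.length ∧ i + k.length ≤ n ∧ k = pvSlice tokens i k.length
    · have hcondN : (2 ≤ k.length ∧ pvAccLen (none : Option (String × Nat)) < k.length ∧
          i + k.length ≤ n ∧ k = pvSlice tokens i k.length) :=
        ⟨hM.1, by have := hM.1; simp only [pvAccLen]; omega, hM.2.1, hM.2.2⟩
      have hR : pvBestB tokens i n ((k, v) :: rest) none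
          = pvMerge (some (v, k.length)) (pvBestB tokens i n rest none) := by
        simp only [pvBestB, if_pos hcondN]; exact ih _
      rw [hR, pvMerge_step]
      by_cases hlt : pvAccLen acc < k.length
      · have hcondA : (2 ≤ k.length ∧ pvAccLen acc < k.length ∧
            i + k.length ≤ n ∧ k = pvSlice tokens i k.length) :=
          ⟨hM.1, hlt, hM.2.1, hM.2.2⟩
        rw [if_pos hlt]
        simp only [pvBestB, if_pos hcondA]
        exact ih _
      · rw [if_neg hlt]
        have : pvBestB tokens i n ((k, v) :: rest) acc = pvBestB tokens i n rest acc := by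
          simp only [pvBestB]; rw [if_neg (by tauto)]
        rw [this, ih acc]
    · have h1 : pvBestB tokens i n ((k, v) :: rest) acc = pvBestB tokens i n rest acc := by
        simp only [pvBestB]; rw [if_neg (by tauto)]
      have h2 : pvBestB tokens i n ((k, v) :: rest) none = pvBestB tokens i n rest none := by
        simp only [pvBestB]; rw [if_neg (by tauto)]
      rw [h1, h2, ih acc]

theorem pvGood_bestB (tokens : List String) (i n : Nat) (hn : n ≤ tokens.length)
    (q : List (List String × String)) : pvGood tokens i n q (pvBestB tokens i n q none) := by
  induction q with
  | nil => intro kv h; simp at h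
  | cons kv rest ih =>
    obtain ⟨k, v⟩ := kv
    by_cases hM : 2 ≤ k.length ∧ i + k.length ≤ n ∧ k = pvSlice tokens i k.length
    · have hcondN : (2 ≤ k.length ∧ pvAccLen (none : Option (String × Nat)) < k.length ∧
          i + k.length ≤ n ∧ k = pvSlice tokens i k.length) :=
        ⟨hM.1, by have := hM.1; simp only [pvAccLen]; omega, hM.2.1, hM.2.2⟩
      have hstep : pvBestB tokens i n ((k, v) :: rest) none
          = pvMerge (some (v, k.length)) (pvBestB tokens i n rest none) := by
        simp only [pvBestB, if_pos hcondN]; exact pvBestB_merge tokens i n rest _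
      rw [hstep]
      rcases hr : pvBestB tokens i n rest none with _ | ⟨w, L⟩
      · rw [hr] at ih
        rw [pvMerge_none]
        refine ⟨hM.1, hM.2.1, ?_, ?_⟩
        · simp only [pvLookup]
          rw [if_pos hM.2.2]
        · intro kv hm hmm
          rcases List.mem_cons.mp hm with h | h
          · subst h; exact le_refl _
          · exact absurd hmm (ih kv h)
      · rw [hr] at ih
        obtain ⟨hL2, hLn, hlook, hmax⟩ := ih
        by_cases hlt : k.length < L
        · rw [pvMerge_right _ _ (by simpa [pvAccLen] using hlt)]
          refine ⟨hL2, hLn, ?_, ?_⟩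
          · simp only [pvLookup]
            rw [if_neg ?_, hlook]
            intro heq
            have : k.length = L := by
              have hsl := pvSlice_len tokens i L (by omega)
              rw [heq, hsl]
            omega
          · intro kv hm hmm
            rcases List.mem_cons.mp hm with h | h
            · subst h; exact Nat.le_of_lt hlt
            · exact hmax kv h hmm
        · rw [pvMerge_left _ _ (by simp only [pvAccLen]; omega)]
          refine ⟨hM.1, hM.2.1, ?_, ?_⟩
          · simp only [pvLookup]
            rw [if_pos hM.2.2]
          · intro kv hm hmm
            rcases List.mem_cons.mp hm with h | h
            · subst h; exact le_refl _
            · have := hmax kv h hmm; omega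
    · have hstep : pvBestB tokens i n ((k, v) :: rest) none = pvBestB tokens i n rest none := by
        simp only [pvBestB]; rw [if_neg (by tauto)]
      rw [hstep]
      rcases hr : pvBestB tokens i n rest none with _ | ⟨w, L⟩ <;> rw [hr] at ih
      · intro kv hm
        rcases List.mem_cons.mp hm with h | h
        · subst h; exact hM
        · exact ih kv h
      · obtain ⟨hL2, hLn, hlook, hmax⟩ := ih
        refine ⟨hL2, hLn, ?_, ?_⟩
        · simp only [pvLookup]
          rw [if_neg ?_, hlook]
          intro heq
          have hl : k.length = L := by
            have hsl := pvSlice_len tokens i L (by omega)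
            rw [heq, hsl]
          exact hM ⟨by omega, by omega, by rw [hl]; exact heq⟩
        · intro kv hm hmm
          rcases List.mem_cons.mp hm with h | h
          · subst h; exact absurd hmm hM
          · exact hmax kv h hmm

theorem pvChar_innerA (tokens : List String) (pm : List (List String × String)) (i : Nat) :
    ∀ L₀, pvChar tokens pm i L₀ (pvInnerA tokens pm i L₀) := by
  intro L₀
  induction L₀ using Nat.strong_induction_on with
  | _ L₀ ih =>
    match L₀ with
    | 0 => intro L h1 h2; omega
    | 1 => intro L h1 h2; omega
    | (L + 2) =>
      rcases hl : pvLookup pm (pvSlice tokens i (L + 2)) with _ | v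
      · have hrec : pvInnerA tokens pm i (L + 2) = pvInnerA tokens pm i (L + 1) := by
          simp only [pvInnerA, hl]
        rw [hrec]
        have hc := ih (L + 1) (by omega)
        rcases hr : pvInnerA tokens pm i (L + 1) with _ | ⟨v, M⟩ <;> rw [hr] at hc
        · intro L' h1 h2
          rcases Nat.lt_or_ge L' (L + 2) with h | h
          · exact hc L' h1 (by omega)
          · have : L' = L + 2 := by omega
            rw [this]; exact hl
        · obtain ⟨h1, h2, h3, h4⟩ := hc
          refine ⟨h1, by omega, h3, ?_⟩
          intro L' hg hle
          rcases Nat.lt_or_ge L' (L + 2) with h | h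
          · exact h4 L' hg (by omega)
          · have : L' = L + 2 := by omega
            rw [this]; exact hl
      · have : pvInnerA tokens pm i (L + 2) = some (v, L + 2) := by
          simp only [pvInnerA, hl]
        rw [this]
        exact ⟨by omega, le_refl _, hl, by intro L' h1 h2; omega⟩

theorem pvChar_uniq (tokens : List String) (pm : List (List String × String)) (i L₀ : Nat)
    (o o' : Option (String × Nat)) (h : pvChar tokens pm i L₀ o) (h' : pvChar tokens pm i L₀ o') :
    o = o' := by
  rcases o with _ | ⟨v, L⟩ <;> rcases o' with _ | ⟨v', L'⟩
  · rfl
  · obtain ⟨h1, h2, h3, _⟩ := h'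
    exact absurd h3 (by rw [h L' h1 h2]; simp)
  · obtain ⟨h1, h2, h3, _⟩ := h
    exact absurd h3 (by rw [h' L h1 h2]; simp)
  · obtain ⟨a1, a2, a3, a4⟩ := h
    obtain ⟨b1, b2, b3, b4⟩ := h'
    rcases Nat.lt_trichotomy L L' with hc | hc | hc
    · exact absurd b3 (by rw [a4 L' hc b2]; simp)
    · subst hc
      rw [a3] at b3
      simp at b3
      rw [b3]
    · exact absurd a3 (by rw [b4 L hc a2]; simp)

theorem pvGood_to_char (tokens : List String) (pm : List (List String × String)) (i n : Nat)
    (hn : n ≤ tokens.length) (o : Option (String × Nat)) (h : pvGood tokens i n pm o) :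
    pvChar tokens pm i (Nat.min (pvMaxLen pm) (n - i)) o := by
  rcases o with _ | ⟨v, L⟩
  · intro L h1 h2
    have hLni : L ≤ n - i := le_trans h2 (Nat.min_le_right _ _)
    apply pvLookup_none
    intro kv hm heq
    have hl : kv.1.length = L := by
      rw [heq]; exact pvSlice_len tokens i L (by omega)
    exact h kv hm ⟨by omega, by omega, by rw [hl]; exact heq⟩
  · obtain ⟨h1, h2, h3, h4⟩ := h
    have hmem := pvLookup_some_mem pm _ v h3
    obtain ⟨kv, hm, he⟩ := hmem
    have hlk : kv.1.length = L := by
      rw [he]; exact pvSlice_len tokens i L (by omega)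
    have hml := pvMaxLen_ge pm kv hm
    refine ⟨h1, Nat.le_min.mpr ⟨by omega, by omega⟩, h3, ?_⟩
    intro L' hg hle
    have hL'ni : L' ≤ n - i := le_trans hle (Nat.min_le_right _ _)
    apply pvLookup_none
    intro kv' hm' heq
    have hl' : kv'.1.length = L' := by
      rw [heq]; exact pvSlice_len tokens i L' (by omega)
    have := h4 kv' hm' ⟨by omega, by omega, by rw [hl']; exact heq⟩
    omega

theorem pvStep (tokens : List String) (pm : List (List String × String)) (i n : Nat)
    (hn : n ≤ tokens.length) :
    pvInnerA tokens pm i (Nat.min (pvMaxLen pm) (n - i)) = pvBestB tokens i n pm none :=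
  pvChar_uniq tokens pm i _ _ _
    (pvChar_innerA tokens pm i _)
    (pvGood_to_char tokens pm i n hn _ (pvGood_bestB tokens i n hn pm))

theorem pvIdxGet_add (d : List ((String × String) × List (List String × String)))
    (q p : String × String) (e : List String × String) :
    pvIdxGet (pvIdxAdd d q e) p = if q = p then pvIdxGet d p ++ [e] else pvIdxGet d p := by
  induction d with
  | nil =>
    simp only [pvIdxAdd, pvIdxGet]
    split_ifs <;> simp
  | cons ql rest ih =>
    obtain ⟨q', l⟩ := ql
    by_cases hq : q' = q
    · subst hq
      by_cases hp : q' = p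
      · subst hp
        simp [pvIdxAdd, pvIdxGet]
      · simp [pvIdxAdd, pvIdxGet, hp]
    · by_cases hp : q' = p
      · subst hp
        have hq' : ¬ q = q' := fun h => hq h.symm
        simp [pvIdxAdd, pvIdxGet, hq, hq']
      · simp [pvIdxAdd, pvIdxGet, hq, hp, ih]

theorem pvBuild_get (pm : List (List String × String)) :
    ∀ (d : List ((String × String) × List (List String × String))) (p : String × String),
    pvIdxGet (pvBuild d pm) p
      = pvIdxGet d p ++ pm.filter (fun kv => decide (2 ≤ kv.1.length ∧ pvPairKey kv.1 = p)) := by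
  induction pm with
  | nil => intro d p; simp [pvBuild]
  | cons kv rest ih =>
    obtain ⟨k, v⟩ := kv
    intro d p
    by_cases h2 : 2 ≤ k.length
    · simp only [pvBuild, if_pos h2]
      rw [ih]
      rw [pvIdxGet_add]
      by_cases hp : pvPairKey k = p
      · rw [if_pos hp]
        rw [List.filter_cons_of_pos (by simp [h2, hp])]
        simp
      · rw [if_neg hp]
        rw [List.filter_cons_of_neg (by simp [hp])]
    · simp only [pvBuild, if_neg h2]
      rw [ih]
      rw [List.filter_cons_of_neg (by simp [h2])]

theorem pvSlice_pairKey (tokens : List String) (i L : Nat) (h2 : 2 ≤ L)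
    (_hle : i + L ≤ tokens.length) :
    pvPairKey (pvSlice tokens i L) = (tokens.getD i "", tokens.getD (i + 1) "") := by
  have h0 : (pvSlice tokens i L)[0]? = tokens[i]? := by
    simp only [pvSlice]
    rw [List.getElem?_take_of_lt (by omega), List.getElem?_drop]
    norm_num
  have h1 : (pvSlice tokens i L)[1]? = tokens[i + 1]? := by
    simp only [pvSlice]
    rw [List.getElem?_take_of_lt (by omega), List.getElem?_drop]
  simp only [pvPairKey, List.getD_eq_getElem?_getD, h0, h1]

theorem pvBestC_filter (tokens : List String) (i n : Nat) (hn : n ≤ tokens.length)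
    (q : List (List String × String)) : ∀ acc,
    pvBestC tokens i n
      (q.filter (fun kv => decide (2 ≤ kv.1.length ∧
        pvPairKey kv.1 = (tokens.getD i "", tokens.getD (i + 1) "")))) acc
      = pvBestB tokens i n q acc := by
  induction q with
  | nil => intro acc; rfl
  | cons kv rest ih =>
    obtain ⟨k, v⟩ := kv
    intro acc
    by_cases hp : 2 ≤ k.length ∧ pvPairKey k = (tokens.getD i "", tokens.getD (i + 1) "")
    · rw [List.filter_cons_of_pos (by simpa using hp)]
      simp only [pvBestC, pvBestB]
      by_cases hc : pvAccLen acc < k.length ∧ i + k.length ≤ n ∧ k = pvSlice tokens i k.length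
      · rw [if_pos hc, if_pos ⟨hp.1, hc.1, hc.2.1, hc.2.2⟩]
        exact ih _
      · rw [if_neg hc, if_neg (by tauto)]
        exact ih _
    · rw [List.filter_cons_of_neg (by simpa using hp)]
      simp only [pvBestB]
      rw [if_neg ?_]
      · exact ih acc
      · intro hc
        obtain ⟨hc2, _, hcn, hceq⟩ := hc
        exact hp ⟨hc2, by
          rw [hceq, pvSlice_pairKey tokens i k.length hc2 (by omega)]⟩

theorem pvBestB_none_last (tokens : List String) (pm : List (List String × String))
    (i n : Nat) (hn : n ≤ tokens.length) (_hi1 : ¬ i + 1 < n) :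
    pvBestB tokens i n pm none = none := by
  have h := pvGood_bestB tokens i n hn pm
  rcases hr : pvBestB tokens i n pm none with _ | ⟨v, L⟩
  · rfl
  · rw [hr] at h
    obtain ⟨h1, h2, _, _⟩ := h
    omega

theorem pvStepB (tokens : List String) (pm : List (List String × String)) (i n : Nat)
    (hn : n ≤ tokens.length) :
    (if i + 1 < n
     then pvBestC tokens i n
        (pvIdxGet (pvBuild [] pm) (tokens.getD i "", tokens.getD (i + 1) "")) none
     else none)
      = pvBestB tokens i n pm none := by
  by_cases hi1 : i + 1 < n
  · rw [if_pos hi1, pvBuild_get pm [] _]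
    simp only [pvIdxGet, List.nil_append]
    exact pvBestC_filter tokens i n hn pm none
  · rw [if_neg hi1, pvBestB_none_last tokens pm i n hn hi1]

theorem pvLoop_eq (tokens : List String) (pm : List (List String × String)) (n : Nat)
    (hn : n ≤ tokens.length) : ∀ fuel i,
    pvLoopA tokens pm (pvMaxLen pm) n fuel i
      = pvLoopB tokens (pvBuild [] pm) n fuel i := by
  intro fuel
  induction fuel with
  | zero => intro i; rfl
  | succ fuel ih =>
    intro i
    simp only [pvLoopA, pvLoopB, pvStepB tokens pm i n hn, pvStep tokens pm i n hn]
    rcases pvBestB tokens i n pm none with _ | ⟨v, L⟩ <;> simp [ih]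

-- ===== VERDICT (by name: the statement is the Claim_ definition above) =====
theorem apply_phrase_map_py_spec : Claim_equal_apply_phrase_map_py := by
  intro tokens pm _
  unfold Spec_apply_phrase_map_py apply_phrase_map_py apply_phrase_map_py_alt
  by_cases h : pm.isEmpty
  · simp [h]
  · simp only [h, Bool.false_eq_true, if_false]
    exact pvLoop_eq tokens pm tokens.length (le_refl _) tokens.length 0
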